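-- pv_equiv track=rewrite | github.com/gabrielepagano/NLP_Project2022 | src/tokenizor.py | tokenize_count_characters
-- ===== SOURCE A (Python) =====
-- import string
--
-- def tokenize_clean_text(text):
--     """
--         Cleans the provided text of any punctuation marks
--
--         Args:
--             text: the text to clean
--
--         Returns:
--             text: the clean text
--     """
--
--     # remove punctuation
--     text = text.translate(str.maketrans('', '', string.punctuation))
--     # convert to lower case
--     text = text.lower()
--     return text
--
-- def tokenize_count_characters(text):
--     """
--         Counts the common & uncommon characters in a provided text
--
--         Args:
--             text: the text to count uncommon characters in
--
--         Returns:
--             count_common: the number of common characters in the provided text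
--             count_uncommon: the number of uncommon characters in the provided text
--     """
--
--     # the considered common characters
--     commons = ['a', 'b', 'c', 'd', 'e', 'f', 'g', 'i', 'h', 'j', 'k', 'l', 'm', 'n', 'o', 'p', 'q', 'r', 's', 't', 'u',
--                'v', 'w', 'x', 'y', 'z',
--                '0', '1', '2', '3', '4', '5', '6', '7', '8', '9']
--
--     text_cleaned = tokenize_clean_text(text)
--
--     count_common = 0
--     count_uncommon = 0
--
--     for elem in text_cleaned:
--         if elem not in commons:
--             count_uncommon += 1
--         else:
--             count_common += 1
--     return count_common, count_uncommon
-- ===== SOURCE B (Python) =====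
-- import string
--
--
-- def tokenize_clean_text(text):
--     text = text.translate(str.maketrans('', '', string.punctuation))
--     text = text.lower()
--     return text
--
--
-- def tokenize_count_characters(text):
--     # Tabulate distinct characters once, then sum the table entries whose key
--     # is common; uncommon is the remainder of the total length.
--     text_cleaned = tokenize_clean_text(text)
--     freq = {}
--     for ch in text_cleaned:
--         freq[ch] = freq.get(ch, 0) + 1
--     common_set = set(string.ascii_lowercase + string.digits)
--     count_common = sum(n for ch, n in freq.items() if ch in common_set)
--     return count_common, len(text_cleaned) - count_common
-- ===== Notes on version B (the rewrite author's own statement) =====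
-- stated objective: alternative
-- what changed: B builds a frequency table of the cleaned text's distinct characters in one pass and then sums the table entries with common keys (uncommon derived by subtraction from the total length), instead of scanning a 36-element list per character with two running counters.
import Mathlib
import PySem

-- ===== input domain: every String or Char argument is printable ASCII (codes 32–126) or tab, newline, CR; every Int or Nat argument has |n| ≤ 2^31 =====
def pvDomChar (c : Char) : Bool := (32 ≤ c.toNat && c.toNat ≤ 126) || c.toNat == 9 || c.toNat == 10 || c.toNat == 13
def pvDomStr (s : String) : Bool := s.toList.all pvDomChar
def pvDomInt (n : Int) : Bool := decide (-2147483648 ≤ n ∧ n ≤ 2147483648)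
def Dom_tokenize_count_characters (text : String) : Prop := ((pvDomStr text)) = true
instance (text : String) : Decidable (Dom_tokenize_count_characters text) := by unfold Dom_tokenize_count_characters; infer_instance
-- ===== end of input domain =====

-- B tabulates distinct characters once and sums the common entries, deriving the
-- uncommon count by subtraction, instead of branching per character (alternative).

-- ===== PORT A =====
-- string.punctuation
def pvPunct : List Char := "!\"#$%&'()*+,-./:;<=>?@[\\]^_`{|}~".toList

-- shared module helper: remove punctuation (str.translate deleting pvPunct), then lower
def tokenize_clean_text (text : String) : String :=
  PySem.Str.lower (String.ofList (text.toList.filter (fun c => !(pvPunct.contains c))))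

-- A's literal 'commons' list, in its order
def pvCommons : List Char :=
  ['a', 'b', 'c', 'd', 'e', 'f', 'g', 'i', 'h', 'j', 'k', 'l', 'm', 'n', 'o', 'p', 'q', 'r',
   's', 't', 'u', 'v', 'w', 'x', 'y', 'z',
   '0', '1', '2', '3', '4', '5', '6', '7', '8', '9']

def tokenize_count_characters (text : String) : Int × Int :=
  let text_cleaned := tokenize_clean_text text
  let counts := text_cleaned.toList.foldl
    (fun (acc : Int × Int) elem =>
      if !(pvCommons.contains elem) then (acc.1, acc.2 + 1) else (acc.1 + 1, acc.2))
    (0, 0)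
  (counts.1, counts.2)

-- ===== PORT B =====
-- set(string.ascii_lowercase + string.digits)
def pvCommonSet : List Char := PySem.Set.ofList "abcdefghijklmnopqrstuvwxyz0123456789".toList

def tokenize_count_characters_alt (text : String) : Int × Int :=
  let text_cleaned := (tokenize_clean_text text).toList
  let freq := text_cleaned.foldl
    (fun (d : PySem.Dict Char Int) ch => d.insert ch (d.getD ch 0 + 1)) PySem.Dict.empty
  let count_common :=
    ((freq.items.filter (fun p => pvCommonSet.contains p.1)).map (·.2)).sum
  (count_common, (text_cleaned.length : Int) - count_common)

-- ===== PRECONDITION & SPEC =====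
def Spec_tokenize_count_characters (text : String) (out : Int × Int) : Prop := out = tokenize_count_characters_alt text
instance (text : String) (out : Int × Int) : Decidable (Spec_tokenize_count_characters text out) := by unfold Spec_tokenize_count_characters; infer_instance

-- ===== CLAIM (what is proved, stated in full; the proofs are below) =====
def Claim_equal_tokenize_count_characters : Prop := ∀ (text : String), Dom_tokenize_count_characters text → Spec_tokenize_count_characters text (tokenize_count_characters text)

-- ===== LEMMAS AND PROOFS =====

-- A's commons list and B's common set hold the same characters
lemma pv_commons_perm : pvCommons.Perm pvCommonSet := by decide

lemma pv_contains_eq (c : Char) : pvCommonSet.contains c = pvCommons.contains c :=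
  (pv_commons_perm.contains_eq (a := c)).symm

-- A's loop computes the two countP's shifted by the accumulator
lemma pv_foldA (cs : List Char) (a b : Int) :
    cs.foldl
      (fun (acc : Int × Int) elem =>
        if !(pvCommons.contains elem) then (acc.1, acc.2 + 1) else (acc.1 + 1, acc.2))
      (a, b)
    = (a + (cs.countP (fun c => pvCommons.contains c) : Int),
       b + (cs.countP (fun c => !(pvCommons.contains c)) : Int)) := by
  induction cs generalizing a b with
  | nil => simp
  | cons x xs ih =>
    cases hx : pvCommons.contains x with
    | true =>
      simp only [List.foldl_cons, hx, Bool.not_true, Bool.false_eq_true, if_false]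
      rw [ih]
      simp only [List.countP_cons, hx, Bool.not_true, Prod.mk.injEq]
      push_cast
      constructor <;> ring
    | false =>
      simp only [List.foldl_cons, hx, Bool.not_false, if_true]
      rw [ih]
      simp only [List.countP_cons, hx, Bool.not_false, Prod.mk.injEq]
      push_cast
      constructor <;> ring

-- B's sum over the frequency table's common entries is the common countP
lemma pv_sum_common (cs : List Char) :
    ((((PySem.Dict.counter cs).items.filter (fun p => pvCommonSet.contains p.1)).map (·.2)).sum)
      = (cs.countP (fun c => pvCommons.contains c) : Int) := by
  rw [PySem.Dict.items_counter, List.filter_map, List.map_map]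
  have hperm : ((PySem.Set.ofList cs).filter (fun k => pvCommonSet.contains k)).Perm
      (cs.dedup.filter (fun k => pvCommonSet.contains k)) := by
    refine List.Perm.filter _ ?_
    refine (List.perm_ext_iff_of_nodup (PySem.Set.nodup_ofList cs) cs.nodup_dedup).mpr ?_
    intro c
    rw [PySem.Set.mem_ofList, List.mem_dedup]
  have h1 := (hperm.map ((·.2) ∘ fun k => (k, (cs.count k : Int)))).sum_eq
  rw [show ((fun (p : Char × Int) => pvCommonSet.contains p.1) ∘ fun k => (k, (cs.count k : Int)))
        = (fun k => pvCommonSet.contains k) from rfl, h1]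
  have h2 : (List.map ((·.2) ∘ fun k => (k, (cs.count k : Int)))
        (cs.dedup.filter (fun k => pvCommonSet.contains k)))
      = (cs.dedup.filter (fun k => pvCommonSet.contains k)).map
        (fun k => (cs.count k : Int)) := rfl
  rw [h2]
  have h3 : ((cs.dedup.filter (fun k => pvCommonSet.contains k)).map
        (fun k => (cs.count k : Int))).sum
      = (((cs.dedup.filter (fun k => pvCommonSet.contains k)).map
        (fun k => cs.count k)).sum : Int) := by
    rw [Nat.cast_list_sum, List.map_map]; rfl
  rw [h3, List.sum_map_count_dedup_filter_eq_countP]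
  simp only [pv_contains_eq]

-- ===== VERDICT (by name: the statement is the Claim_ definition above) =====
theorem tokenize_count_characters_spec : Claim_equal_tokenize_count_characters := by
  intro text _
  show tokenize_count_characters text = tokenize_count_characters_alt text
  unfold tokenize_count_characters tokenize_count_characters_alt
  simp only [pv_foldA, PySem.Dict.foldl_insert_getD_add_one_eq_counter, pv_sum_common,
    zero_add, Prod.mk.injEq]
  have hlen : ((tokenize_clean_text text).toList).length
      = ((tokenize_clean_text text).toList).countP (fun c => pvCommons.contains c)
      + ((tokenize_clean_text text).toList).countP (fun c => !(pvCommons.contains c)) := by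
    simpa using
      List.length_eq_countP_add_countP (p := fun c => pvCommons.contains c)
        (l := (tokenize_clean_text text).toList)
  exact ⟨trivial, by omega⟩
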